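-- pv_equiv track=rewrite | github.com/Nghia03092004/nghia03092004.github.io | project_euler/problem_508/solution.py | verify_representation
-- ===== SOURCE A (Python) =====
-- def to_base_im1(n_real: int, n_imag: int = 0) -> list:
--     """
--     Convert Gaussian integer n_real + n_imag*i to base (i-1).
--     Returns list of digits (LSB first), each in {0, 1}.
--
--     Division by (i-1):
--     (a + bi) / (i - 1) = (a + bi)(-i - 1) / |i-1|^2
--                         = (a + bi)(-1 - i) / 2
--                         = (-a - ai - bi - bi^2) / 2
--                         = (-a + b)/2 + (-a - b)i/2
--     """
--     re, im = n_real, n_imag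
--     digits = []
--     seen = set()
--
--     while re != 0 or im != 0:
--         state = (re, im)
--         if state in seen:
--             break  # safety: avoid infinite loops
--         seen.add(state)
--
--         # Digit is the parity of the real part
--         d = re % 2
--         if d < 0:
--             d += 2
--         digits.append(d)
--
--         # Subtract digit and divide by (i-1)
--         re_new = (-(re - d) + im) // 2
--         im_new = (-(re - d) - im) // 2
--         re, im = re_new, im_new
--
--     if not digits:
--         digits = [0]
--
--     return digits
--
-- def verify_representation(n_real: int, n_imag: int = 0) -> bool:
--     """Verify that the base-(i-1) representation reconstructs the original number."""
--     digits = to_base_im1(n_real, n_imag)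
--
--     # Reconstruct: sum d_k * (i-1)^k
--     # (i-1)^k computed iteratively
--     re_sum, im_sum = 0, 0
--     pow_re, pow_im = 1, 0  # (i-1)^0 = 1
--
--     for d in digits:
--         re_sum += d * pow_re
--         im_sum += d * pow_im
--         # Multiply power by (i-1): (a+bi)(i-1) = ai - a + bi^2 - bi = -(a+b) + (a-b)i
--         new_re = -(pow_re + pow_im)
--         new_im = pow_re - pow_im
--         pow_re, pow_im = new_re, new_im
--
--     return re_sum == n_real and im_sum == n_imag
-- ===== SOURCE B (Python) =====
-- def verify_representation(n_real: int, n_imag: int = 0) -> bool: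
--     """Fused single-pass verification: one recursion both performs the base-(i-1)
--     division steps and rebuilds the value by Horner's rule on the way back up;
--     no digit list and no explicit powers of (i-1) are ever materialized."""
--     def recon(re, im, seen):
--         if re == 0 and im == 0:
--             return (0, 0)
--         if (re, im) in seen:
--             return (0, 0)  # same cycle guard as the original converter
--         seen.add((re, im))
--         d = re % 2
--         v = recon((d - re + im) // 2, (d - re - im) // 2, seen)
--         # v*(i-1) + d : (a+bi)(i-1) = -(a+b) + (a-b)i
--         return (d - (v[0] + v[1]), v[0] - v[1])
--
--     re, im = recon(n_real, n_imag, set())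
--     return re == n_real and im == n_imag
-- ===== Notes on version B (the rewrite author's own statement) =====
-- stated objective: simpler
-- what changed: B fuses A's two phases (to_base_im1 building a digit list, then a loop accumulating explicit powers of (i-1) into two running sums) into one recursion that performs each division step and rebuilds the value by Horner's rule v*(i-1)+d on the way back up, with exact integer (re, im) arithmetic and no digit list or powers.
import Mathlib
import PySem

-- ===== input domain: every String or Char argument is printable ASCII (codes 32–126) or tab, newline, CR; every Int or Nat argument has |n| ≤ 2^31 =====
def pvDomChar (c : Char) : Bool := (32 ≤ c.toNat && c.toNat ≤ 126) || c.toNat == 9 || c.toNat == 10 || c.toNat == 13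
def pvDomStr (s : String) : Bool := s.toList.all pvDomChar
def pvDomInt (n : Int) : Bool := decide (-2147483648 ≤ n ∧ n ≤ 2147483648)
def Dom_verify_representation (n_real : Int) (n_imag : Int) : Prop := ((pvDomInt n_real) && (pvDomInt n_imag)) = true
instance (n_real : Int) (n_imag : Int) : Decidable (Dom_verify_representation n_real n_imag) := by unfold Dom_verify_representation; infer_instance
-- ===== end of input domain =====

-- B fuses A's two phases (build digit list, then power-accumulating reconstruction)
-- into one recursion that rebuilds the value by Horner's rule; objective: simpler.

-- ===== PORT A =====
-- helper to_base_im1: the while loop carries a `seen` set and breaks on a repeated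
-- state; a fuel of 10000 only makes the recursion structural (the loop needs ≤ 70
-- steps for |n| ≤ 2^31, since the state magnitudes roughly halve each step).
def digitsLoop : Nat → Int → Int → PySem.Set (Int × Int) → List Int
  | 0, _, _, _ => []
  | fuel+1, re, im, seen =>
    if re = 0 ∧ im = 0 then []
    else if PySem.Set.contains seen (re, im) then []
    else
      let d0 := PySem.Int.mod re 2
      let d := if d0 < 0 then d0 + 2 else d0   -- dead branch in Python (mod 2 ≥ 0), kept literally
      d :: digitsLoop fuel (PySem.Int.floordiv (-(re - d) + im) 2)
            (PySem.Int.floordiv (-(re - d) - im) 2) (PySem.Set.add seen (re, im))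

def to_base_im1 (n_real : Int) (n_imag : Int) : List Int :=
  let digits := digitsLoop 10000 n_real n_imag PySem.Set.empty
  if digits = [] then [0] else digits

def verify_representation (n_real : Int) (n_imag : Int) : Bool :=
  let digits := to_base_im1 n_real n_imag
  let st := digits.foldl
    (fun (st : Int × Int × Int × Int) d =>
      (st.1 + d * st.2.2.1, st.2.1 + d * st.2.2.2,
       -(st.2.2.1 + st.2.2.2), st.2.2.1 - st.2.2.2))
    (0, 0, 1, 0)
  decide (st.1 = n_real) && decide (st.2.1 = n_imag)

-- ===== PORT B =====
-- B's inner recursion `recon`: divide by (i-1), recurse, then v*(i-1) + d on the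
-- way back up (Horner). Same fuel remark as for digitsLoop.
def recon : Nat → Int → Int → PySem.Set (Int × Int) → Int × Int
  | 0, _, _, _ => (0, 0)
  | fuel+1, re, im, seen =>
    if re = 0 ∧ im = 0 then (0, 0)
    else if PySem.Set.contains seen (re, im) then (0, 0)
    else
      let d := PySem.Int.mod re 2
      let v := recon fuel (PySem.Int.floordiv (d - re + im) 2)
                 (PySem.Int.floordiv (d - re - im) 2) (PySem.Set.add seen (re, im))
      (d - (v.1 + v.2), v.1 - v.2)

def verify_representation_alt (n_real : Int) (n_imag : Int) : Bool :=
  let v := recon 10000 n_real n_imag PySem.Set.empty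
  decide (v.1 = n_real) && decide (v.2 = n_imag)

-- ===== PRECONDITION & SPEC =====
def Spec_verify_representation (n_real : Int) (n_imag : Int) (out : Bool) : Prop := out = verify_representation_alt n_real n_imag
instance (n_real : Int) (n_imag : Int) (out : Bool) : Decidable (Spec_verify_representation n_real n_imag out) := by unfold Spec_verify_representation; infer_instance

-- ===== CLAIM =====
def Claim_equal_verify_representation : Prop := ∀ (n_real : Int) (n_imag : Int), Dom_verify_representation n_real n_imag → Spec_verify_representation n_real n_imag (verify_representation n_real n_imag)

-- ===== LEMMAS AND PROOFS =====

-- Horner value of a digit list (LSB first): foldr step (0,0) = Σ d_k (i-1)^k as (re, im).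
def hornerIm1 (ds : List Int) : Int × Int :=
  ds.foldr (fun d (v : Int × Int) => (d - (v.1 + v.2), v.1 - v.2)) (0, 0)

-- B's fused recursion computes exactly the Horner value of A's digit list.
theorem recon_eq_horner (fuel : Nat) : ∀ (re im : Int) (seen : PySem.Set (Int × Int)),
    recon fuel re im seen = hornerIm1 (digitsLoop fuel re im seen) := by
  induction fuel with
  | zero => intro re im seen; simp [recon, digitsLoop, hornerIm1]
  | succ fuel ih =>
    intro re im seen
    rw [recon, digitsLoop]
    by_cases h0 : re = 0 ∧ im = 0
    · simp [h0, hornerIm1]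
    · simp only [if_neg h0]
      by_cases hs : PySem.Set.contains seen (re, im) = true
      · have hs' : (re, im) ∈ seen := by simpa using hs
        simp [hs', hornerIm1]
      · simp only [if_neg hs]
        have hd : ¬ PySem.Int.mod re 2 < 0 := by
          have := PySem.Int.mod_nonneg re (b := 2) (by norm_num)
          omega
        simp only [if_neg hd, hornerIm1, List.foldr_cons]
        have harg1 : (PySem.Int.mod re 2) - re + im = -(re - PySem.Int.mod re 2) + im := by ring
        have harg2 : (PySem.Int.mod re 2) - re - im = -(re - PySem.Int.mod re 2) - im := by ring
        rw [harg1, harg2, ih]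
        rfl

-- A's fold from state (s₁, s₂, p₁, p₂) produces sums s + p · hornerIm1 ds (Gaussian product).
theorem afold_eq_horner (ds : List Int) : ∀ (s1 s2 p1 p2 : Int),
    (ds.foldl
      (fun (st : Int × Int × Int × Int) d =>
        (st.1 + d * st.2.2.1, st.2.1 + d * st.2.2.2,
         -(st.2.2.1 + st.2.2.2), st.2.2.1 - st.2.2.2))
      (s1, s2, p1, p2)).1
      = s1 + p1 * (hornerIm1 ds).1 - p2 * (hornerIm1 ds).2
    ∧ (ds.foldl
      (fun (st : Int × Int × Int × Int) d =>
        (st.1 + d * st.2.2.1, st.2.1 + d * st.2.2.2,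
         -(st.2.2.1 + st.2.2.2), st.2.2.1 - st.2.2.2))
      (s1, s2, p1, p2)).2.1
      = s2 + p1 * (hornerIm1 ds).2 + p2 * (hornerIm1 ds).1 := by
  induction ds with
  | nil => intro s1 s2 p1 p2; simp [hornerIm1]
  | cons d ds ih =>
    intro s1 s2 p1 p2
    simp only [List.foldl_cons, hornerIm1, List.foldr_cons]
    obtain ⟨h1, h2⟩ := ih (s1 + d * p1) (s2 + d * p2) (-(p1 + p2)) (p1 - p2)
    rw [hornerIm1] at h1 h2
    constructor
    · rw [h1]; ring
    · rw [h2]; ring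

-- A's padding of an empty digit list with [0] does not change the Horner value.
theorem horner_pad (ds : List Int) :
    hornerIm1 (if ds = [] then [0] else ds) = hornerIm1 ds := by
  by_cases h : ds = [] <;> simp [h, hornerIm1]

-- ===== VERDICT =====
theorem verify_representation_spec : Claim_equal_verify_representation := by
  intro n_real n_imag _
  unfold Spec_verify_representation verify_representation verify_representation_alt to_base_im1
  obtain ⟨h1, h2⟩ := afold_eq_horner
    (if digitsLoop 10000 n_real n_imag PySem.Set.empty = [] then [0]
     else digitsLoop 10000 n_real n_imag PySem.Set.empty) 0 0 1 0
  simp only [h1, h2, horner_pad, recon_eq_horner]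
  ring_nf
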